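-- pv_equiv track=rewrite | github.com/YuanXianguo/Python-Interview-Master | Exam/DMAI/字符串数组排序.py | str_sort2
-- ===== SOURCE A (Python) =====
-- def str_sort2(str):
--     strs = str.split(",")
--
--     def main(strs):
--         n = len(strs)
--         if n <= 1:
--            return strs
--         mid = n // 2
--         lefts = main(strs[:mid])
--         rights = main(strs[mid:])
--
--         left, right = 0, 0
--         res = list()
--         while left < len(lefts) and right < len(rights):
--             if lefts[left] <= rights[right]:
--                 res.append(lefts[left])
--                 left += 1
--             else:
--                 res.append(rights[right])
--                 right += 1
--         res.extend(lefts[left:])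
--         res.extend(rights[right:])
--
--         return res
--     return main(strs)
-- ===== SOURCE B (Python) =====
-- def str_sort2(str):
--     return sorted(str.split(","))
-- ===== Notes on version B (the rewrite author's own statement) =====
-- stated objective: simpler
-- what changed: Replaces the hand-written recursive merge sort (with an index-based merge loop) by a single call to the built-in stable sorted() on the comma-split list.
import Mathlib
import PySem

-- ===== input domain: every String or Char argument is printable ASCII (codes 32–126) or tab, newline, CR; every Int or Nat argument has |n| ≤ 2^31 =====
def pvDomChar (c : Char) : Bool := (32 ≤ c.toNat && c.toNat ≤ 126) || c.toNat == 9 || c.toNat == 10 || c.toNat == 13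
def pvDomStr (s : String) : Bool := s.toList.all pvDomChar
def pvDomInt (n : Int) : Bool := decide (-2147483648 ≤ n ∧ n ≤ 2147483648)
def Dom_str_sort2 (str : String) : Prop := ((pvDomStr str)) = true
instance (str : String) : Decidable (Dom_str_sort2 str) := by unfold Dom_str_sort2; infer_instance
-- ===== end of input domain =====

-- B replaces A's hand-written recursive merge sort by one built-in stable sort call (simpler).

-- ===== PORT A =====
-- merge loop of A: indices left/right walking lefts/rights, transcribed as structural
-- recursion on the two remaining suffixes (same comparisons, same appended values;
-- the trailing res.extend(lefts[left:]) / res.extend(rights[right:]) are the base cases)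
def pvMerge : List String → List String → List String
  | [], rights => rights
  | lefts, [] => lefts
  | l :: ls, r :: rs =>
    if l ≤ r then l :: pvMerge ls (r :: rs) else r :: pvMerge (l :: ls) rs

-- inner 'main': slices strs[:mid] / strs[mid:] with 0 ≤ mid ≤ n are exactly take/drop
def pvMain (strs : List String) : List String :=
  if strs.length ≤ 1 then strs
  else
    let mid := strs.length / 2
    pvMerge (pvMain (strs.take mid)) (pvMain (strs.drop mid))
termination_by strs.length
decreasing_by
  · simp only [List.length_take]; omega
  · simp only [List.length_drop]; omega

-- str.split(",") with a nonempty separator always returns a value: split? "," = some parts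
def str_sort2 (str : String) : List String := pvMain ((PySem.Str.split? str ",").getD [])

-- ===== PORT B =====
def str_sort2_alt (str : String) : List String :=
  PySem.List.sorted ((PySem.Str.split? str ",").getD []) (fun x => x) false

-- ===== PRECONDITION & SPEC =====
def Spec_str_sort2 (str : String) (out : List String) : Prop := out = str_sort2_alt str
instance (str : String) (out : List String) : Decidable (Spec_str_sort2 str out) := by unfold Spec_str_sort2; infer_instance

-- ===== CLAIM (what is proved, stated in full; the proofs are below) =====
def Claim_equal_str_sort2 : Prop := ∀ (str : String), Dom_str_sort2 str → Spec_str_sort2 str (str_sort2 str)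

-- ===== LEMMAS AND PROOFS =====

theorem pvMerge_perm (a b : List String) : (pvMerge a b).Perm (a ++ b) := by
  induction a generalizing b with
  | nil => simp [pvMerge]
  | cons l ls ih =>
    induction b with
    | nil => simp [pvMerge]
    | cons r rs ihb =>
      simp only [pvMerge]
      split
      · exact (ih (r :: rs)).cons l
      · refine List.Perm.trans (ihb.cons r) ?_
        simpa using (List.Perm.symm (List.perm_middle (a := r) (l₁ := l :: ls) (l₂ := rs)))

theorem pvMerge_pairwise (a b : List String)
    (ha : a.Pairwise (· ≤ ·)) (hb : b.Pairwise (· ≤ ·)) :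
    (pvMerge a b).Pairwise (· ≤ ·) := by
  induction a generalizing b with
  | nil => simpa [pvMerge] using hb
  | cons l ls ih =>
    induction b with
    | nil => simpa [pvMerge] using ha
    | cons r rs ihb =>
      rw [List.pairwise_cons] at ha hb
      simp only [pvMerge]
      split
      · rename_i hlr
        refine List.pairwise_cons.2 ⟨?_, ih (r :: rs) ha.2 (List.pairwise_cons.2 hb)⟩
        intro x hx
        have := (pvMerge_perm ls (r :: rs)).mem_iff.1 hx
        rcases List.mem_append.1 this with h | h
        · exact ha.1 x h
        · rcases List.mem_cons.1 h with rfl | h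
          · exact hlr
          · exact le_trans hlr (hb.1 x h)
      · rename_i hlr
        rw [not_le] at hlr
        refine List.pairwise_cons.2 ⟨?_, ihb hb.2⟩
        intro x hx
        have := (pvMerge_perm (l :: ls) rs).mem_iff.1 hx
        rcases List.mem_append.1 this with h | h
        · rcases List.mem_cons.1 h with rfl | h
          · exact le_of_lt hlr
          · exact le_trans (le_of_lt hlr) (ha.1 x h)
        · exact hb.1 x h

theorem pvMain_perm (xs : List String) : (pvMain xs).Perm xs := by
  induction xs using pvMain.induct with
  | case1 xs h => rw [pvMain, if_pos h]
  | case2 xs h mid ih1 ih2 =>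
    rw [pvMain, if_neg h]
    refine List.Perm.trans (pvMerge_perm _ _) ?_
    have h2 : (pvMain (xs.take mid) ++ pvMain (xs.drop mid)).Perm (xs.take mid ++ xs.drop mid) :=
      List.Perm.append ih1 ih2
    simpa [List.take_append_drop] using h2

theorem pvMain_pairwise (xs : List String) : (pvMain xs).Pairwise (· ≤ ·) := by
  induction xs using pvMain.induct with
  | case1 xs h =>
    rw [pvMain, if_pos h]
    match xs, h with
    | [], _ => simp
    | [x], _ => simp
  | case2 xs h mid ih1 ih2 =>
    rw [pvMain, if_neg h]
    exact pvMerge_pairwise _ _ ih1 ih2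

-- ===== VERDICT (by name: the statement is the Claim_ definition above) =====
theorem str_sort2_spec : Claim_equal_str_sort2 := by
  intro s _
  unfold Spec_str_sort2 str_sort2 str_sort2_alt
  exact (PySem.List.sorted_id_eq_of_perm_of_pairwise _ _
    (pvMain_perm _) (pvMain_pairwise _)).symm
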